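-- pv_equiv track=rewrite | github.com/prerna-patil26/CareerIntelli_AI | app/modules/resume_analysis/skill_gap_analysis.py | prioritize_learning
-- ===== SOURCE A (Python) =====
-- from typing import List, Dict, Any
--
-- def prioritize_learning(gap_analysis: Dict[str, Any]) -> List[str]:
--
--     missing = gap_analysis.get("missing_skills", [])
--
--     # simple importance grouping
--     core_skills = [
--         "python",
--         "machine learning",
--         "deep learning",
--         "sql",
--         "statistics"
--     ]
--
--     priority = []
--
--     for skill in core_skills:
--         if skill in missing:
--             priority.append(skill)
--
--     for skill in missing:
--         if skill not in priority:
--             priority.append(skill)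
--
--     return priority
-- ===== SOURCE B (Python) =====
-- def prioritize_learning(gap_analysis):
--     missing = gap_analysis.get("missing_skills", [])
--     core_skills = [
--         "python",
--         "machine learning",
--         "deep learning",
--         "sql",
--         "statistics"
--     ]
--     rank = {skill: i for i, skill in enumerate(core_skills)}
--     deduped = list(dict.fromkeys(missing))
--     return sorted(deduped, key=lambda skill: rank.get(skill, len(core_skills)))
-- ===== Notes on version B (the rewrite author's own statement) =====
-- stated objective: idiomatic
-- what changed: Replaces A's two explicit append loops (core skills present in missing, then first occurrences of the rest) by building a rank dict from core_skills, de-duplicating missing with dict.fromkeys, and returning one stable sorted() keyed by rank.get(skill, len(core_skills)).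
import Mathlib
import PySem

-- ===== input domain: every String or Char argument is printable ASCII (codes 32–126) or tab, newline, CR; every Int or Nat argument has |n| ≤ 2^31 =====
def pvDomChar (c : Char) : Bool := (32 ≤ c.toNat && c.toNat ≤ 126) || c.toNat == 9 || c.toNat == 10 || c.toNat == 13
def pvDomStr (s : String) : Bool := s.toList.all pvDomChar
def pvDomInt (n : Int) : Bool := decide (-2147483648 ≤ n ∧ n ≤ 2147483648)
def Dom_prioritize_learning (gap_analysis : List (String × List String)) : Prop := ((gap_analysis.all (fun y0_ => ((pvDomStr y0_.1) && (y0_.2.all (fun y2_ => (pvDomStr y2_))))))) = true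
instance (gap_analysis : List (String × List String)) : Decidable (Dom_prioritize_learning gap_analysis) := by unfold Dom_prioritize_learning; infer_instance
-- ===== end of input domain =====

-- B replaces A's two explicit filter passes by a rank dict plus one stable sort of the deduplicated missing list (idiomatic restructuring, no speed claim).


-- ===== PORT A =====
def prioritize_learning (gap_analysis : List (String × List String)) : List String :=
  let missing := PySem.Dict.getD (PySem.Dict.mk gap_analysis) "missing_skills" []
  let core_skills : List String := ["python", "machine learning", "deep learning", "sql", "statistics"]
  let priority : List String := core_skills.foldl (fun acc skill => if missing.contains skill then acc ++ [skill] else acc) []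
  missing.foldl (fun acc skill => if acc.contains skill then acc else acc ++ [skill]) priority

-- ===== PORT B =====
def prioritize_learning_alt (gap_analysis : List (String × List String)) : List String :=
  let missing := PySem.Dict.getD (PySem.Dict.mk gap_analysis) "missing_skills" []
  let core_skills : List String := ["python", "machine learning", "deep learning", "sql", "statistics"]
  let rank : PySem.Dict String Int := (PySem.List.enumerate core_skills).foldl (fun d p => PySem.Dict.insert d p.2 p.1) PySem.Dict.empty
  let deduped := PySem.List.dedup missing
  PySem.List.sorted deduped (fun skill => PySem.Dict.getD rank skill (PySem.List.len core_skills)) false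

-- ===== PRECONDITION & SPEC =====
def Spec_prioritize_learning (gap_analysis : List (String × List String)) (out : List String) : Prop := out = prioritize_learning_alt gap_analysis
instance (gap_analysis : List (String × List String)) (out : List String) : Decidable (Spec_prioritize_learning gap_analysis out) := by unfold Spec_prioritize_learning; infer_instance

-- ===== CLAIM (what is proved, stated in full; the proofs are below) =====
def Claim_equal_prioritize_learning : Prop := ∀ (gap_analysis : List (String × List String)), Dom_prioritize_learning gap_analysis → Spec_prioritize_learning gap_analysis (prioritize_learning gap_analysis)

-- ===== LEMMAS AND PROOFS =====

-- the core-skill list, B's sort key written directly (last insert tested first), and the shared output shape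
def pvCore : List String := ["python", "machine learning", "deep learning", "sql", "statistics"]

def pvKey (s : String) : Int :=
  if s = "statistics" then 4 else if s = "sql" then 3 else if s = "deep learning" then 2
  else if s = "machine learning" then 1 else if s = "python" then 0 else 5

def pvF (q : List String) : List String :=
  pvCore.filter (fun s => decide (s ∈ q)) ++ q.filter (fun s => decide (s ∉ pvCore))

lemma pvKey_le (s : String) : pvKey s ≤ 5 := by
  unfold pvKey; split_ifs <;> norm_num

lemma pvKey_noncore {s : String} (h : s ∉ pvCore) : pvKey s = 5 := by
  simp [pvCore] at h
  simp [pvKey, h.1, h.2.1, h.2.2.1, h.2.2.2.1, h.2.2.2.2]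

lemma pvKeyB_eq : (fun skill => PySem.Dict.getD
    ((PySem.List.enumerate (["python", "machine learning", "deep learning", "sql", "statistics"] : List String)).foldl
      (fun d p => PySem.Dict.insert d p.2 p.1) PySem.Dict.empty) skill
      (PySem.List.len (["python", "machine learning", "deep learning", "sql", "statistics"] : List String))) = pvKey := by
  funext s
  show PySem.Dict.getD (((((PySem.Dict.empty.insert "python" (0:Int)).insert "machine learning" 1).insert
      "deep learning" 2).insert "sql" 3).insert "statistics" 4) s 5 = pvKey s
  rw [PySem.Dict.getD_insert, PySem.Dict.getD_insert, PySem.Dict.getD_insert,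
      PySem.Dict.getD_insert, PySem.Dict.getD_insert, PySem.Dict.getD_empty, pvKey]

lemma pv_insertBy_front {x : String} {l : List String}
    (h : ∀ y ∈ l, pvKey x < pvKey y) :
    PySem.List.insertBy (fun a b => decide (pvKey a < pvKey b)) x l = x :: l := by
  cases l with
  | nil => rfl
  | cons y ys =>
    have hy : decide (pvKey x < pvKey y) = true := by simp [h y (by simp)]
    simp [PySem.List.insertBy, hy]

lemma pv_insertBy_pass {x : String} {c r : List String}
    (h : ∀ y ∈ c, ¬ (pvKey x < pvKey y)) :
    PySem.List.insertBy (fun a b => decide (pvKey a < pvKey b)) x (c ++ r)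
      = c ++ PySem.List.insertBy (fun a b => decide (pvKey a < pvKey b)) x r := by
  induction c with
  | nil => simp
  | cons y ys ih =>
    have hy : decide (pvKey x < pvKey y) = false := by simp [h y (by simp)]
    rw [List.cons_append]
    rw [show PySem.List.insertBy (fun a b => decide (pvKey a < pvKey b)) x (y :: (ys ++ r))
        = y :: PySem.List.insertBy (fun a b => decide (pvKey a < pvKey b)) x (ys ++ r) from by
      simp [PySem.List.insertBy, hy]]
    rw [ih (fun y hy => h y (by simp [hy]))]
    simp

-- generic single-insertion step for a core skill x, with pvCore split around x
lemma pv_ins_core (x : String) (pre suf : List String) (p : List String)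
    (hsplit : pvCore = pre ++ x :: suf)
    (hpre : ∀ y ∈ pre, pvKey y < pvKey x)
    (hsuf : ∀ y ∈ suf, pvKey x < pvKey y)
    (hx5 : pvKey x < 5) (hxp : x ∉ p) :
    PySem.List.insertBy (fun a b => decide (pvKey a < pvKey b)) x (pvF p) = pvF (p ++ [x]) := by
  have hxcore : x ∈ pvCore := by rw [hsplit]; simp
  have hne_pre : ∀ y ∈ pre, y ≠ x := fun y hy he => absurd (hpre y hy) (by rw [he]; exact lt_irrefl _)
  have hne_suf : ∀ y ∈ suf, y ≠ x := fun y hy he => absurd (hsuf y hy) (by rw [he]; exact lt_irrefl _)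
  have hCp : pvCore.filter (fun s => decide (s ∈ p)) =
      pre.filter (fun s => decide (s ∈ p)) ++ suf.filter (fun s => decide (s ∈ p)) := by
    rw [hsplit, List.filter_append, List.filter_cons]
    simp [hxp]
  have hn5 : ∀ y ∈ p.filter (fun s => decide (s ∉ pvCore)), pvKey x < pvKey y := by
    intro y hy
    rw [List.mem_filter] at hy
    rw [show pvKey y = 5 from pvKey_noncore (by simpa using hy.2)]; exact hx5
  -- left side: pass over the pre-part, insert in front of the rest
  have hL : PySem.List.insertBy (fun a b => decide (pvKey a < pvKey b)) x (pvF p) =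
      pre.filter (fun s => decide (s ∈ p)) ++
        (x :: (suf.filter (fun s => decide (s ∈ p)) ++ p.filter (fun s => decide (s ∉ pvCore)))) := by
    rw [pvF, hCp, List.append_assoc, pv_insertBy_pass, pv_insertBy_front]
    · intro y hy
      rcases List.mem_append.mp hy with hy | hy
      · exact hsuf y (List.mem_filter.mp hy).1
      · exact hn5 y hy
    · intro y hy he
      exact absurd (hpre y (List.mem_filter.mp hy).1) (not_lt_of_gt he)
  -- right side: recompute pvF (p ++ [x])
  have hfpre : pre.filter (fun s => decide (s ∈ p ++ [x])) = pre.filter (fun s => decide (s ∈ p)) := by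
    apply List.filter_congr; intro y hy
    simp [hne_pre y hy]
  have hfsuf : suf.filter (fun s => decide (s ∈ p ++ [x])) = suf.filter (fun s => decide (s ∈ p)) := by
    apply List.filter_congr; intro y hy
    simp [hne_suf y hy]
  have hR : pvF (p ++ [x]) =
      pre.filter (fun s => decide (s ∈ p)) ++
        (x :: (suf.filter (fun s => decide (s ∈ p)) ++ p.filter (fun s => decide (s ∉ pvCore)))) := by
    rw [pvF, List.filter_append (l₁ := p)]
    have hxx : ([x].filter (fun s => decide (s ∉ pvCore))) = [] := by simp [hxcore]
    rw [hxx, List.append_nil, hsplit, List.filter_append, List.filter_cons]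
    have hxmem : (decide (x ∈ p ++ [x])) = true := by simp
    rw [hxmem, if_pos rfl, hfpre, hfsuf, ← hsplit]
    simp
  rw [hL, hR]

-- a single insertion step turns pvF p into pvF (p ++ [x]) when x is new
lemma pv_ins_step {x : String} {p : List String} (hxp : x ∉ p) :
    PySem.List.insertBy (fun a b => decide (pvKey a < pvKey b)) x (pvF p) = pvF (p ++ [x]) := by
  by_cases hx : x ∈ pvCore
  · -- five concrete core skills
    simp only [pvCore, List.mem_cons, List.not_mem_nil, or_false] at hx
    rcases hx with h | h | h | h | h <;> subst h
    · exact pv_ins_core "python" [] ["machine learning", "deep learning", "sql", "statistics"] p (by rfl) (by decide) (by decide) (by decide) hxp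
    · exact pv_ins_core "machine learning" ["python"] ["deep learning", "sql", "statistics"] p (by rfl) (by decide) (by decide) (by decide) hxp
    · exact pv_ins_core "deep learning" ["python", "machine learning"] ["sql", "statistics"] p (by rfl) (by decide) (by decide) (by decide) hxp
    · exact pv_ins_core "sql" ["python", "machine learning", "deep learning"] ["statistics"] p (by rfl) (by decide) (by decide) (by decide) hxp
    · exact pv_ins_core "statistics" ["python", "machine learning", "deep learning", "sql"] [] p (by rfl) (by decide) (by decide) (by decide) hxp
  · -- non-core: appended at the very end
    have h1 : PySem.List.insertBy (fun a b => decide (pvKey a < pvKey b)) x (pvF p) = pvF p ++ [x] := by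
      have := pv_insertBy_pass (x := x) (c := pvF p) (r := [])
        (fun y hy hlt => absurd hlt (by rw [pvKey_noncore hx]; exact not_lt.mpr (pvKey_le y)))
      simpa using this
    have h2 : pvCore.filter (fun s => decide (s ∈ p ++ [x])) = pvCore.filter (fun s => decide (s ∈ p)) := by
      apply List.filter_congr; intro y hy
      have : y ≠ x := fun he => hx (he ▸ hy)
      simp [this]
    rw [h1, pvF, pvF, h2, List.filter_append]
    simp [hx]
lemma pv_sort_fold (xs : List String) : ∀ (p : List String), (p ++ xs).Nodup →
    xs.foldl (fun acc x => PySem.List.insertBy (fun a b => decide (pvKey a < pvKey b)) x acc) (pvF p) = pvF (p ++ xs) := by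
  induction xs with
  | nil => intro p _; simp
  | cons x xs ih =>
    intro p hnd
    have hxp : x ∉ p := by
      rcases List.nodup_append.mp hnd with ⟨_, _, hdisj⟩
      intro hm; exact hdisj x hm x (by simp) rfl
    have hnd' : ((p ++ [x]) ++ xs).Nodup := by rwa [List.append_cons] at hnd
    show xs.foldl _ (PySem.List.insertBy _ x (pvF p)) = _
    rw [pv_ins_step hxp, ih (p ++ [x]) hnd']
    congr 1
    simp

lemma pv_dedup_append_singleton (p : List String) (x : String) :
    PySem.List.dedup (p ++ [x]) = if x ∈ p then PySem.List.dedup p else PySem.List.dedup p ++ [x] := by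
  simp only [PySem.List.dedup_eq_ofList, PySem.Set.ofList_append_singleton, PySem.Set.add_eq_ite,
    PySem.Set.mem_ofList]

-- the second loop of A, started from the core part, keeps the pvF-like shape
lemma pv_A_fold (xs : List String) : ∀ (m p : List String), (∀ s ∈ xs, s ∈ m) →
    xs.foldl (fun acc s => if acc.contains s then acc else acc ++ [s])
      (pvCore.filter (fun s => decide (s ∈ m)) ++ (PySem.List.dedup p).filter (fun s => decide (s ∉ pvCore)))
    = pvCore.filter (fun s => decide (s ∈ m)) ++ (PySem.List.dedup (p ++ xs)).filter (fun s => decide (s ∉ pvCore)) := by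
  induction xs with
  | nil => intro m p _; simp
  | cons x xs ih =>
    intro m p hmem
    have hxm : x ∈ m := hmem x (by simp)
    have hcond : (x ∈ pvCore.filter (fun s => decide (s ∈ m)) ++ (PySem.List.dedup p).filter (fun s => decide (s ∉ pvCore)))
        ↔ (x ∈ pvCore ∨ x ∈ p) := by
      simp only [List.mem_append, List.mem_filter, PySem.List.mem_dedup, decide_eq_true_eq]
      constructor
      · rintro (⟨h, _⟩ | ⟨h, _⟩)
        · exact Or.inl h
        · exact Or.inr h
      · rintro (h | h)
        · exact Or.inl ⟨h, hxm⟩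
        · by_cases hc : x ∈ pvCore
          · exact Or.inl ⟨hc, hxm⟩
          · exact Or.inr ⟨h, hc⟩
    show xs.foldl _ (if List.contains _ x then _ else _) = _
    by_cases hx : x ∈ pvCore ∨ x ∈ p
    · have : List.contains (pvCore.filter (fun s => decide (s ∈ m)) ++ (PySem.List.dedup p).filter (fun s => decide (s ∉ pvCore))) x = true := by
        simp only [List.contains_iff_mem]; exact hcond.mpr hx
      rw [this, if_pos rfl]
      have hD : (PySem.List.dedup (p ++ [x])).filter (fun s => decide (s ∉ pvCore))
          = (PySem.List.dedup p).filter (fun s => decide (s ∉ pvCore)) := by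
        rw [pv_dedup_append_singleton]
        by_cases hp : x ∈ p
        · rw [if_pos hp]
        · rw [if_neg hp, List.filter_append]
          have hc : x ∈ pvCore := hx.resolve_right hp
          simp [hc]
      rw [← hD, ih m (p ++ [x]) (fun s hs => hmem s (by simp [hs]))]
      rw [show p ++ [x] ++ xs = p ++ x :: xs from by simp]
    · rw [not_or] at hx
      have hnotin : x ∉ pvCore.filter (fun s => decide (s ∈ m)) ++ (PySem.List.dedup p).filter (fun s => decide (s ∉ pvCore)) :=
        fun hmm => absurd (hcond.mp hmm) (by simp [hx.1, hx.2])
      have : List.contains (pvCore.filter (fun s => decide (s ∈ m)) ++ (PySem.List.dedup p).filter (fun s => decide (s ∉ pvCore))) x = false := by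
        simpa using hnotin
      rw [this, if_neg (by simp)]
      have hD : (PySem.List.dedup (p ++ [x])).filter (fun s => decide (s ∉ pvCore))
          = (PySem.List.dedup p).filter (fun s => decide (s ∉ pvCore)) ++ [x] := by
        rw [pv_dedup_append_singleton, if_neg hx.2, List.filter_append]
        simp [hx.1]
      rw [List.append_assoc, ← hD, ih m (p ++ [x]) (fun s hs => hmem s (by simp [hs]))]
      rw [show p ++ [x] ++ xs = p ++ x :: xs from by simp]

-- the whole computation, for an arbitrary missing list
lemma pv_main (m : List String) :
    m.foldl (fun acc skill => if acc.contains skill then acc else acc ++ [skill])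
      ((["python", "machine learning", "deep learning", "sql", "statistics"] : List String).foldl
        (fun acc skill => if m.contains skill then acc ++ [skill] else acc) [])
    = PySem.List.sorted (PySem.List.dedup m)
        (fun skill => PySem.Dict.getD
          ((PySem.List.enumerate (["python", "machine learning", "deep learning", "sql", "statistics"] : List String)).foldl
            (fun d p => PySem.Dict.insert d p.2 p.1) PySem.Dict.empty) skill
          (PySem.List.len (["python", "machine learning", "deep learning", "sql", "statistics"] : List String))) false := by
  rw [pvKeyB_eq]
  -- A's first loop is a filter of the core list
  rw [PySem.List.foldl_append_if_eq_filter]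
  have hfc : (["python", "machine learning", "deep learning", "sql", "statistics"] : List String).filter (fun skill => m.contains skill)
      = pvCore.filter (fun s => decide (s ∈ m)) := by
    apply List.filter_congr; intro y _; simp
  rw [List.nil_append, hfc]
  -- A's second loop via pv_A_fold with p = []
  have hA := pv_A_fold m m [] (fun s hs => hs)
  rw [show PySem.List.dedup ([] : List String) = [] from rfl] at hA
  simp only [List.filter_nil, List.append_nil, List.nil_append] at hA
  rw [hA]
  -- B's sort via pv_sort_fold with p = []
  rw [PySem.List.sorted_eq_foldl_insertBy]
  have hB := pv_sort_fold (PySem.List.dedup m) [] (by simp)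
  rw [show pvF ([] : List String) = [] from rfl] at hB
  rw [List.nil_append] at hB
  rw [hB, pvF]
  have : pvCore.filter (fun s => decide (s ∈ PySem.List.dedup m)) = pvCore.filter (fun s => decide (s ∈ m)) := by
    apply List.filter_congr; intro y _; simp
  rw [this]

-- ===== VERDICT (by name: the statement is the Claim_ definition above) =====
theorem prioritize_learning_spec : Claim_equal_prioritize_learning := by
  intro g _
  exact pv_main (PySem.Dict.getD (PySem.Dict.mk g) "missing_skills" [])
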